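-- pv_equiv track=rewrite | github.com/whalebill/PythonLearn | study/umass/FileProcessor.py | getOldestDOB
-- ===== SOURCE A (Python) =====
-- def getOldestDOB(names, dobs):
--     dob_num = []
--     for dob in dobs:
--         dob_num.append(dob.replace('-', ''))
--     min_dob = min(dob_num)
--     index_min_dobs = [index for index, value in enumerate(dob_num) if value == min_dob]
--     oldest_dobs = []
--     for index in index_min_dobs:
--         oldest_dobs.append(names[index])
--     return oldest_dobs
-- ===== SOURCE B (Python) =====
-- def getOldestDOB(names, dobs):
--     best = None
--     idxs = []
--     for i, dob in enumerate(dobs):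
--         d = dob.replace('-', '')
--         if best is None or d < best:
--             best = d
--             idxs = [i]
--         elif d == best:
--             idxs.append(i)
--     return [names[i] for i in idxs]
-- ===== Notes on version B (the rewrite author's own statement) =====
-- stated objective: alternative
-- what changed: Replaces A's three passes (build normalized list, min(), filter indices, gather names) with a single forward pass that tracks the running minimum and its index list; only the final name gather remains.
import Mathlib
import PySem

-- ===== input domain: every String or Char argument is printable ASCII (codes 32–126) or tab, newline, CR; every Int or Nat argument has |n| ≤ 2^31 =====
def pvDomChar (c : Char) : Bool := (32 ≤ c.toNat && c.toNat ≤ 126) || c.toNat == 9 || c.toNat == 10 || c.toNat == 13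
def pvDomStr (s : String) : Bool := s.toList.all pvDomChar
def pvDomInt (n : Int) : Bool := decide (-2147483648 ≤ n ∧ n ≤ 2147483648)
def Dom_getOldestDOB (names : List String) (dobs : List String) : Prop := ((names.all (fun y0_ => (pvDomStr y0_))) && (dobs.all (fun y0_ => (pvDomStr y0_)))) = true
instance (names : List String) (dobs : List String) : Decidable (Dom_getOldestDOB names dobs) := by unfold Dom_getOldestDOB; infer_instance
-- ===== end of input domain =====

-- B replaces A's multi-pass shape (normalize all dobs, min(), filter indices, gather names) by a
-- single forward pass tracking the running minimum and its index list; return value only, no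
-- argument is mutated. Same asymptotic cost.

-- ===== PORT A =====
def getOldestDOB (names : List String) (dobs : List String) : List String :=
  -- dob_num = []; for dob in dobs: dob_num.append(dob.replace('-', ''))
  let dob_num : List String :=
    dobs.foldl (fun acc dob => acc ++ [PySem.Str.replace dob "-" ""]) []
  -- min_dob = min(dob_num)   (ValueError on empty dob_num: excluded by Pre_)
  let min_dob : String := (PySem.List.min? dob_num (fun x => x)).getD ""
  -- index_min_dobs = [index for index, value in enumerate(dob_num) if value == min_dob]
  let index_min_dobs : List Int :=
    ((PySem.List.enumerate dob_num 0).filter (fun p => p.2 == min_dob)).map (fun p => p.1)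
  -- oldest_dobs = []; for index in index_min_dobs: oldest_dobs.append(names[index])
  -- (names[index] IndexError: in range under Pre_, default never read)
  index_min_dobs.foldl (fun acc i => acc ++ [(PySem.List.pyGet? names i).getD ""]) []

-- ===== PORT B =====
def getOldestDOB_alt (names : List String) (dobs : List String) : List String :=
  -- best = None; idxs = []; single pass over enumerate(dobs)
  let s : Option String × List Int :=
    (PySem.List.enumerate dobs 0).foldl
      (fun st p =>
        let d := PySem.Str.replace p.2 "-" ""
        match st.1 with
        | none => (some d, [p.1])
        | some b =>
          if d < b then (some d, [p.1])
          else if d = b then (some b, st.2 ++ [p.1])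
          else st)
      (none, [])
  -- return [names[i] for i in idxs]   (in range under Pre_, default never read)
  s.2.map (fun i => (PySem.List.pyGet? names i).getD "")

-- ===== PRECONDITION & SPEC =====
-- Pre_ = exactly the inputs on which A returns: dobs nonempty (on [] A raises ValueError from
-- min([])), and every index whose normalized DOB attains the minimum lies inside names (otherwise
-- names[index] raises IndexError); 'attains the minimum' is stated declaratively as 'not beaten by
-- a strictly smaller normalized DOB'.
def Pre_getOldestDOB (names : List String) (dobs : List String) : Prop :=
  dobs ≠ [] ∧ ∀ i < dobs.length, names.length ≤ i →
    ∃ j < dobs.length,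
      PySem.Str.replace (dobs.getD j "") "-" "" < PySem.Str.replace (dobs.getD i "") "-" ""
instance (names : List String) (dobs : List String) : Decidable (Pre_getOldestDOB names dobs) := by unfold Pre_getOldestDOB; infer_instance

def pvWitness_getOldestDOB : List String × List String :=
  (["Ann", "Bob", "Cid"], ["1990-01-02", "1980-05-06", "1980-05-06"])

def Spec_getOldestDOB (names : List String) (dobs : List String) (out : List String) : Prop := out = getOldestDOB_alt names dobs
instance (names : List String) (dobs : List String) (out : List String) : Decidable (Spec_getOldestDOB names dobs out) := by unfold Spec_getOldestDOB; infer_instance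

-- ===== CLAIM (what is proved, stated in full; the proofs are below) =====
def Claim_equal_getOldestDOB : Prop := ∀ (names : List String) (dobs : List String), Dom_getOldestDOB names dobs → Pre_getOldestDOB names dobs → Spec_getOldestDOB names dobs (getOldestDOB names dobs)

-- ===== LEMMAS AND PROOFS =====

-- B's loop body as a named function (pattern-matched; equal to the port's lambda, see pv_step_eq)
def pvStep : Option String × List Int → Int × String → Option String × List Int
  | (none, _), p => (some (PySem.Str.replace p.2 "-" ""), [p.1])
  | (some b, idxs), p =>
      if PySem.Str.replace p.2 "-" "" < b then (some (PySem.Str.replace p.2 "-" ""), [p.1])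
      else if PySem.Str.replace p.2 "-" "" = b then (some b, idxs ++ [p.1])
      else (some b, idxs)

theorem pv_step_eq :
    (fun (st : Option String × List Int) (p : Int × String) =>
        let d := PySem.Str.replace p.2 "-" ""
        match st.1 with
        | none => (some d, [p.1])
        | some b =>
          if d < b then (some d, [p.1])
          else if d = b then (some b, st.2 ++ [p.1])
          else st) = pvStep := by
  funext st p
  obtain ⟨o, ix⟩ := st
  cases o <;> rfl

theorem pv_foldl_min_le (l : List String) (m : String) : l.foldl min m ≤ m := by
  induction l generalizing m with
  | nil => simp
  | cons x t ih => exact le_trans (ih (min m x)) (min_le_left m x)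

-- B's loop from a running state (some m, idxs): the first component becomes the overall minimum M
-- of m and the normalized values of l, and the index list is idxs (kept iff M = m, i.e. no strictly
-- smaller value appeared) followed by all indices of l whose normalized value equals M.
theorem pv_fold_inv (l : List String) (s : Int) (m : String) (idxs : List Int) :
    (PySem.List.enumerate l s).foldl pvStep (some m, idxs) =
      (some ((l.map (fun d => PySem.Str.replace d "-" "")).foldl min m),
       (if (l.map (fun d => PySem.Str.replace d "-" "")).foldl min m < m then [] else idxs) ++
         ((PySem.List.enumerate l s).filter
            (fun p => PySem.Str.replace p.2 "-" "" == (l.map (fun d => PySem.Str.replace d "-" "")).foldl min m)).map (fun p => p.1)) := by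
  induction l generalizing s m idxs with
  | nil => simp
  | cons d t ih =>
    rw [PySem.List.enumerate_cons]
    set n := PySem.Str.replace d "-" "" with hn
    have hMle2 : ∀ m', (t.map (fun d => PySem.Str.replace d "-" "")).foldl min m' ≤ m' :=
      fun m' => pv_foldl_min_le _ _
    simp only [List.map_cons, List.foldl_cons, List.filter_cons, ← hn]
    by_cases h1 : n < m
    · have hstep : pvStep (some m, idxs) (s, d) = (some n, [s]) := by
        simp only [pvStep, ← hn]; rw [if_pos h1]
      rw [hstep, ih]
      simp only [min_eq_right (le_of_lt h1)]
      set M := (t.map (fun d => PySem.Str.replace d "-" "")).foldl min n with hM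
      have hMle : M ≤ n := hMle2 n
      have hMm : M < m := lt_of_le_of_lt hMle h1
      rw [if_pos hMm]
      by_cases h2 : M = n
      · have hb : (n == M) = true := by simp [h2]
        rw [if_neg (h2 ▸ lt_irrefl n), hb]
        simp
      · have hlt : M < n := lt_of_le_of_ne hMle h2
        have hb : (n == M) = false := by simp [Ne.symm h2]
        rw [if_pos hlt, hb]
        simp
    · by_cases h2 : n = m
      · have hstep : pvStep (some m, idxs) (s, d) = (some m, idxs ++ [s]) := by
          simp only [pvStep, ← hn]; rw [if_neg h1, if_pos h2]
        rw [hstep, ih]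
        simp only [min_eq_left (h2 ▸ le_refl m : m ≤ n)]
        set M := (t.map (fun d => PySem.Str.replace d "-" "")).foldl min m with hM
        have hMle : M ≤ m := hMle2 m
        by_cases h3 : M < m
        · have hb : (n == M) = false := by
            simp only [beq_eq_false_iff_ne, ne_eq, h2]
            exact fun he => absurd he.symm (ne_of_lt h3)
          rw [if_pos h3, if_pos h3, hb]
          simp
        · have hMm : M = m := le_antisymm hMle (le_of_not_gt h3)
          have hb : (n == M) = true := by simp [h2, hMm]
          rw [if_neg h3, if_neg h3, hb]
          simp
      · have h3 : m < n := lt_of_le_of_ne (le_of_not_gt h1) (Ne.symm h2)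
        have hstep : pvStep (some m, idxs) (s, d) = (some m, idxs) := by
          simp only [pvStep, ← hn]; rw [if_neg h1, if_neg h2]
        rw [hstep, ih]
        simp only [min_eq_left (le_of_lt h3)]
        set M := (t.map (fun d => PySem.Str.replace d "-" "")).foldl min m with hM
        have hb : (n == M) = false := by
          simp only [beq_eq_false_iff_ne, ne_eq]
          exact fun he => absurd he (ne_of_gt (lt_of_le_of_lt (hMle2 m) h3))
        rw [hb]
        simp

theorem pv_enumerate_map {α β : Type} (f : α → β) (l : List α) (s : Int) :
    PySem.List.enumerate (l.map f) s = (PySem.List.enumerate l s).map (fun p => (p.1, f p.2)) := by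
  induction l generalizing s with
  | nil => simp
  | cons x t ih => simp [PySem.List.enumerate_cons, ih]

theorem pv_main (names dobs : List String) (h : dobs ≠ []) :
    getOldestDOB names dobs = getOldestDOB_alt names dobs := by
  obtain ⟨d, rest, rfl⟩ := List.exists_cons_of_ne_nil h
  unfold getOldestDOB getOldestDOB_alt
  rw [pv_step_eq]
  simp only [PySem.List.foldl_append_singleton_eq_map, List.nil_append]
  set f := fun d => PySem.Str.replace d "-" "" with hf
  set M := ((rest.map f).foldl min (f d)) with hMdef
  have hmin : PySem.List.min? ((d :: rest).map f) (fun x => x) = some M := by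
    rw [List.map_cons]; exact PySem.List.min?_id_cons (f d) (rest.map f)
  rw [PySem.List.enumerate_cons, List.foldl_cons]
  have hstep1 : pvStep (none, []) (0, d) = (some (f d), [0]) := rfl
  rw [hstep1, pv_fold_inv, hmin]
  have hMle : M ≤ f d := pv_foldl_min_le _ _
  -- both sides are now gathers over index lists; show the index lists coincide
  rw [List.map_cons, PySem.List.enumerate_cons, List.filter_cons]
  rw [pv_enumerate_map, List.filter_map, List.map_map]
  simp only [Option.getD_some]
  by_cases h2 : f d = M
  · have hb : (f d == M) = true := by simp [h2]
    rw [if_neg (h2 ▸ lt_irrefl M : ¬ M < f d), hb]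
    simp [Function.comp_def, hMdef, hf]
  · have hlt : M < f d := lt_of_le_of_ne hMle (fun he => h2 he.symm)
    have hb : (f d == M) = false := by simp [h2]
    rw [if_pos hlt, hb]
    simp [Function.comp_def, hMdef, hf]

-- ===== VERDICT (by name: the statement is the Claim_ definition above) =====
theorem getOldestDOB_spec : Claim_equal_getOldestDOB := by
  intro names dobs _ hpre
  unfold Spec_getOldestDOB
  exact pv_main names dobs hpre.1
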